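-- pv_equiv track=rewrite | github.com/axel92xd/ayed1-2025-tps | TP3/EJ5.py | butacas_contiguas
-- ===== SOURCE A (Python) =====
-- def butacas_contiguas(matriz:list[list[int]])->tuple[int, int]:
--     """
--     Busca la secuencia más larga de butacas libres contiguas en una misma fila.
--
--     Pre: Recibe la matriz de asientos.
--     Post: Retorna una tupla: (longitud_maxima, indice_de_la_fila).
--     """
--     contador_mas_largo = 0
--     fila_record = -1
--
--     for i, f in enumerate(matriz):
--         contador = 0
--         for c in f:
--             if c == 0: # Butaca libre
--                 contador += 1
--                 if contador > contador_mas_largo: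
--                     contador_mas_largo = contador
--                     fila_record = i # Guarda el índice de la fila
--             else: # Butaca ocupada, la secuencia se rompe
--                 contador = 0
--
--     return contador_mas_largo, fila_record
-- ===== SOURCE B (Python) =====
-- def butacas_contiguas(matriz: list[list[int]]) -> tuple[int, int]:
--     """
--     Busca la secuencia mas larga de butacas libres contiguas en una misma fila.
--     Algoritmo por barreras: la corrida libre mas larga de una fila es la mayor
--     distancia entre posiciones ocupadas consecutivas (con centinelas -1 y len),
--     menos uno; luego max + index sobre la lista de corridas por fila.
--     """
--     def corrida(f):
--         ocupadas = [-1] + [j for j, c in enumerate(f) if c != 0] + [len(f)]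
--         return max(b - a - 1 for a, b in zip(ocupadas, ocupadas[1:]))
--
--     runs = [corrida(f) for f in matriz]
--     best = max(runs, default=0)
--     fila = runs.index(best) if best > 0 else -1
--     return best, fila
-- ===== Notes on version B (the rewrite author's own statement) =====
-- stated objective: alternative
-- what changed: Replaces A's fused consecutive-zero counter scan by a barrier-gap algorithm: each row's longest free run is the maximum gap between consecutive occupied positions (with sentinels), and the winning row is then chosen by max() plus first-occurrence index() over the per-row run list instead of a running strict-greater update.
import Mathlib
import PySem

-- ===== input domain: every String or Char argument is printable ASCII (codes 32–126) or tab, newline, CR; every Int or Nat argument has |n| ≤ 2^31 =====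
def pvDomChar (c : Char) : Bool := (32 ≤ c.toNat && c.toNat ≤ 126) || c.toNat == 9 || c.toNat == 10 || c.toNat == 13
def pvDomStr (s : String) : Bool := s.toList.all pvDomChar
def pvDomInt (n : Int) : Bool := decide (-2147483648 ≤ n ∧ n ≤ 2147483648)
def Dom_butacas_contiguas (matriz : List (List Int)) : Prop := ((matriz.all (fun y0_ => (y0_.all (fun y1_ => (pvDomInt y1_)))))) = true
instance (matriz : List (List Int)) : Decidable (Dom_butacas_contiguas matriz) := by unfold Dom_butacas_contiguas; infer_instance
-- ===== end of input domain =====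

-- B computes each row's longest free run as the maximum gap between consecutive
-- occupied positions (with sentinels) and then picks the row by max + first index;
-- same return value as A's fused counter scan (objective: alternative).

-- ===== PORT A =====
-- inner-loop body of A: state (contador_mas_largo, fila_record, contador), current row index i
def pvStepA (i : Int) (st : Int × Int × Int) (c : Int) : Int × Int × Int :=
  if c == 0 then
    let contador := st.2.2 + 1
    if contador > st.1 then (contador, i, contador) else (st.1, st.2.1, contador)
  else (st.1, st.2.1, 0)

def butacas_contiguas (matriz : List (List Int)) : Int × Int :=
  (PySem.List.enumerate matriz).foldl
    (fun (acc : Int × Int) (p : Int × List Int) =>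
      let inner := p.2.foldl (pvStepA p.1) (acc.1, acc.2, 0)
      (inner.1, inner.2.1))
    (0, -1)

-- ===== PORT B =====
-- gaps of consecutive pairs: [b - a - 1 for a, b in zip(l, l[1:])]
def pvGapsOf (l : List Int) : List Int := (l.zip l.tail).map (fun p => p.2 - p.1 - 1)

-- corrida(f): occupied positions with sentinels -1 and len(f); longest free run = max gap - 1
def pvCorrida (f : List Int) : Int :=
  let ocupadas : List Int :=
    [-1] ++ ((PySem.List.enumerate f).filter (fun p => p.2 != 0)).map Prod.fst ++ [(f.length : Int)]
  match PySem.List.max? (pvGapsOf ocupadas) (fun y => y) with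
  | some v => v
  | none => 0  -- unreachable: ocupadas has ≥ 2 elements, so the gap list is nonempty (Python's max is over a nonempty generator)

def butacas_contiguas_alt (matriz : List (List Int)) : Int × Int :=
  let runs := matriz.map pvCorrida
  let best := match PySem.List.max? runs (fun y => y) with
    | some v => v
    | none => 0  -- max(runs, default=0)
  let fila : Int :=
    if best > 0 then
      match PySem.List.index? runs best with
      | some k => (k : Int)
      | none => -1  -- unreachable: best > 0 forces best ∈ runs (Python's .index succeeds)
    else -1
  (best, fila)

-- ===== PRECONDITION & SPEC =====
def Spec_butacas_contiguas (matriz : List (List Int)) (out : Int × Int) : Prop := out = butacas_contiguas_alt matriz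
instance (matriz : List (List Int)) (out : Int × Int) : Decidable (Spec_butacas_contiguas matriz out) := by unfold Spec_butacas_contiguas; infer_instance

-- ===== CLAIM (what is proved, stated in full; the proofs are below) =====
def Claim_equal_butacas_contiguas : Prop := ∀ (matriz : List (List Int)), Dom_butacas_contiguas matriz → Spec_butacas_contiguas matriz (butacas_contiguas matriz)

-- ===== LEMMAS AND PROOFS =====

-- proof-side reference scan: longest zero-run of f given c pending leading zeros
def pvM (c : Int) : List Int → Int
  | [] => c
  | x :: t => if x == 0 then pvM (c + 1) t else max c (pvM 0 t)

theorem pvM_ge (f : List Int) (c : Int) : c ≤ pvM c f := by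
  induction f generalizing c with
  | nil => simp [pvM]
  | cons x t ih =>
    simp only [pvM]
    split
    · exact le_trans (by omega) (ih (c + 1))
    · exact le_max_left _ _

-- proof-side counter scan (used to characterise A's inner loop)
def pvStepB (st : Int × Int) (c : Int) : Int × Int :=
  let actual := if c == 0 then st.2 + 1 else 0
  (max st.1 actual, actual)

theorem foldB_fst_ge (t : List Int) (m c : Int) : m ≤ (t.foldl pvStepB (m, c)).1 := by
  induction t generalizing m c with
  | nil => simp
  | cons x t ih =>
    simp only [List.foldl_cons, pvStepB]
    exact le_trans (le_max_left _ _) (ih _ _)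

-- A's inner row loop in terms of the counter scan
theorem rowA (f : List Int) (i b fi c : Int) (hc : 0 ≤ c) (hcb : c ≤ b) :
    f.foldl (pvStepA i) (b, fi, c) =
      ((f.foldl pvStepB (b, c)).1,
       if (f.foldl pvStepB (b, c)).1 > b then i else fi,
       (f.foldl pvStepB (b, c)).2) := by
  induction f generalizing b fi c with
  | nil => simp
  | cons x t ih =>
    by_cases hx : x = 0
    · subst hx
      simp only [List.foldl_cons, pvStepA, pvStepB, beq_self_eq_true, if_true]
      by_cases hgt : c + 1 > b
      · rw [if_pos hgt]
        have hmax : max b (c + 1) = c + 1 := max_eq_right (by omega)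
        simp only [hmax]
        rw [ih (c + 1) i (c + 1) (by omega) le_rfl]
        have hM : c + 1 ≤ (t.foldl pvStepB (c + 1, c + 1)).1 := foldB_fst_ge t _ _
        rw [ite_self, if_pos (by omega)]
      · rw [if_neg hgt]
        have hmax : max b (c + 1) = b := max_eq_left (by omega)
        simp only [hmax]
        exact ih b fi (c + 1) (by omega) (by omega)
    · have hx' : (x == 0) = false := by simpa using hx
      simp only [List.foldl_cons, pvStepA, pvStepB, hx', Bool.false_eq_true, if_false]
      have hmax : max b 0 = b := max_eq_left (by omega)
      simp only [hmax]
      exact ih b fi 0 le_rfl (by omega)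

-- the counter scan computes pvM
theorem foldB_to_M (f : List Int) (b c : Int) (hc : 0 ≤ c) (hcb : c ≤ b) :
    (f.foldl pvStepB (b, c)).1 = max b (pvM c f) := by
  induction f generalizing b c with
  | nil => simp [pvM, max_eq_left hcb]
  | cons x t ih =>
    by_cases hx : x = 0
    · subst hx
      simp only [List.foldl_cons, pvStepB, beq_self_eq_true, if_true, pvM]
      rw [ih (max b (c + 1)) (c + 1) (by omega) (le_max_right _ _)]
      have := pvM_ge t (c + 1)
      omega
    · have hx' : (x == 0) = false := by simpa using hx
      simp only [List.foldl_cons, pvStepB, hx', Bool.false_eq_true, if_false, pvM]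
      rw [max_eq_left (by omega), ih b 0 le_rfl (by omega)]
      have := pvM_ge t 0
      omega

-- max of a nonempty list, foldl form
def pvGMax : List Int → Int
  | [] => 0
  | x :: t => t.foldl max x

theorem foldl_max_init (l : List Int) (x y : Int) :
    l.foldl max (max x y) = max x (l.foldl max y) := by
  induction l generalizing y with
  | nil => simp
  | cons a t ih => simp only [List.foldl_cons, max_assoc]; exact ih _

theorem G_gaps_cons (a b : Int) (l : List Int) (h : l ≠ []) :
    pvGMax (pvGapsOf (a :: b :: l)) = max (b - a - 1) (pvGMax (pvGapsOf (b :: l))) := by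
  cases l with
  | nil => exact absurd rfl h
  | cons c r =>
    simp only [pvGapsOf, List.tail_cons, List.zip_cons_cons, List.map_cons, pvGMax,
      List.foldl_cons]
    exact foldl_max_init _ _ _

-- occupied indices of f, enumerated from s
def pvIdxs (s : Int) (f : List Int) : List Int :=
  ((PySem.List.enumerate f s).filter (fun p => p.2 != 0)).map Prod.fst

theorem gaps_eq (f : List Int) (s p : Int) :
    pvGMax (pvGapsOf (p :: (pvIdxs s f ++ [s + (f.length : Int)]))) = pvM (s - p - 1) f := by
  induction f generalizing s p with
  | nil =>
    simp [pvIdxs, PySem.List.enumerate_nil, pvGapsOf, pvGMax, pvM]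
  | cons x t ih =>
    by_cases hx : x = 0
    · subst hx
      have hidx : pvIdxs s (0 :: t) = pvIdxs (s + 1) t := by
        simp [pvIdxs, PySem.List.enumerate_cons]
      have hlen : s + (((0 : Int) :: t).length : Int) = (s + 1) + (t.length : Int) := by
        simp; omega
      rw [hidx, hlen, ih (s + 1) p]
      simp only [pvM, beq_self_eq_true, if_true]
      have : (s + 1) - p - 1 = (s - p - 1) + 1 := by omega
      rw [this]
    · have hx' : (x == 0) = false := by simpa using hx
      have hidx : pvIdxs s (x :: t) = s :: pvIdxs (s + 1) t := by
        simp [pvIdxs, PySem.List.enumerate_cons, bne, hx']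
      have hlen : s + ((x :: t).length : Int) = (s + 1) + (t.length : Int) := by
        simp; omega
      rw [hidx, hlen]
      have hne : pvIdxs (s + 1) t ++ [(s + 1) + (t.length : Int)] ≠ [] := by
        simp
      rw [List.cons_append, G_gaps_cons p s _ hne, ih (s + 1) s]
      simp only [pvM, hx', Bool.false_eq_true, if_false]
      have : (s + 1) - s - 1 = 0 := by omega
      rw [this]

-- pvCorrida computes pvM 0
theorem pvCorrida_eq (f : List Int) : pvCorrida f = pvM 0 f := by
  have hkey : pvGMax (pvGapsOf ((-1) :: (pvIdxs 0 f ++ [(f.length : Int)]))) = pvM 0 f := by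
    have := gaps_eq f 0 (-1)
    norm_num at this
    exact this
  have hne : pvIdxs 0 f ++ [(f.length : Int)] ≠ [] := by simp
  unfold pvCorrida
  show (match PySem.List.max? (pvGapsOf ((-1) :: (pvIdxs 0 f ++ [(f.length : Int)]))) (fun y => y) with
        | some v => v | none => 0) = pvM 0 f
  cases hrest : pvIdxs 0 f ++ [(f.length : Int)] with
  | nil => exact absurd hrest hne
  | cons q r =>
    rw [hrest] at hkey
    have hg : pvGapsOf ((-1) :: q :: r) = (q - (-1) - 1) :: pvGapsOf (q :: r) := by
      simp [pvGapsOf]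
    rw [hg] at hkey ⊢
    rw [PySem.List.max?_id_cons]
    exact hkey

-- selection reference: A's outer loop in recursive form over rows
def pvSel : List (List Int) → Int → Int → Int → Int × Int
  | [], _, b, fi => (b, fi)
  | f :: t, s, b, fi =>
    if pvM 0 f > b then pvSel t (s + 1) (pvM 0 f) s else pvSel t (s + 1) b fi

-- A's outer fold equals pvSel
theorem outerA (rows : List (List Int)) (s b fi : Int) (hb : 0 ≤ b) :
    (PySem.List.enumerate rows s).foldl
      (fun (acc : Int × Int) (p : Int × List Int) =>
        let inner := p.2.foldl (pvStepA p.1) (acc.1, acc.2, 0)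
        (inner.1, inner.2.1))
      (b, fi) = pvSel rows s b fi := by
  induction rows generalizing s b fi with
  | nil => simp [PySem.List.enumerate_nil, pvSel]
  | cons f t ih =>
    rw [PySem.List.enumerate_cons, List.foldl_cons]
    have hrow := rowA f s b fi 0 le_rfl hb
    rw [foldB_to_M f b 0 le_rfl hb] at hrow
    simp only [hrow]
    have hge := pvM_ge f 0
    simp only [pvSel]
    by_cases hgt : pvM 0 f > b
    · rw [max_eq_right (by omega), if_pos hgt, if_pos hgt]
      exact ih _ _ s (by omega)
    · rw [max_eq_left (by omega), if_neg (by omega), if_neg hgt]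
      exact ih _ _ fi hb

-- first index of v in rs
def pvIdxFst : List Int → Int → Nat
  | [], _ => 0
  | x :: t, v => if x = v then 0 else pvIdxFst t v + 1

theorem index?_eq_pvIdxFst (rs : List Int) (v : Int) (h : v ∈ rs) :
    PySem.List.index? rs v = some (pvIdxFst rs v) := by
  induction rs with
  | nil => simp at h
  | cons x t ih =>
    by_cases hx : x = v
    · subst hx
      rw [PySem.List.index?_cons_self]
      simp [pvIdxFst]
    · have hm : v ∈ t := by
        rcases List.mem_cons.mp h with h1 | h1
        · exact absurd h1.symm hx
        · exact h1
      rw [PySem.List.index?_cons_of_ne t hx, ih hm]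
      simp [pvIdxFst, hx]

theorem le_foldl_max' (l : List Int) (b : Int) : b ≤ l.foldl max b := by
  induction l generalizing b with
  | nil => simp
  | cons x t ih => exact le_trans (le_max_left _ _) (ih _)

theorem foldl_max_mem (l : List Int) (b : Int) : l.foldl max b = b ∨ l.foldl max b ∈ l := by
  induction l generalizing b with
  | nil => simp
  | cons x t ih =>
    simp only [List.foldl_cons]
    rcases ih (max b x) with h | h
    · rcases max_cases b x with ⟨he, _⟩ | ⟨he, _⟩
      · left; rw [h, he]
      · right; rw [h, he]; exact List.mem_cons_self
    · right; exact List.mem_cons_of_mem _ h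

-- pvSel in closed form: overall max and first index of the max
theorem selEq (rows : List (List Int)) (s b fi : Int) (hb : 0 ≤ b) :
    pvSel rows s b fi =
      ((rows.map (fun f => pvM 0 f)).foldl max b,
       if (rows.map (fun f => pvM 0 f)).foldl max b > b
       then s + (pvIdxFst (rows.map (fun f => pvM 0 f)) ((rows.map (fun f => pvM 0 f)).foldl max b) : Int)
       else fi) := by
  induction rows generalizing s b fi with
  | nil => simp [pvSel]
  | cons f t ih =>
    simp only [pvSel, List.map_cons, List.foldl_cons]
    have hr0 : 0 ≤ pvM 0 f := pvM_ge f 0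
    by_cases hgt : pvM 0 f > b
    · rw [if_pos hgt, ih (s + 1) (pvM 0 f) s (by omega), max_eq_right (by omega)]
      have hmr : pvM 0 f ≤ (t.map (fun f => pvM 0 f)).foldl max (pvM 0 f) := le_foldl_max' _ _
      by_cases hm2 : (t.map (fun f => pvM 0 f)).foldl max (pvM 0 f) > pvM 0 f
      · rw [if_pos hm2,
          if_pos (show (t.map (fun f => pvM 0 f)).foldl max (pvM 0 f) > b by omega)]
        have hne : pvM 0 f ≠ (t.map (fun f => pvM 0 f)).foldl max (pvM 0 f) := by omega
        simp only [pvIdxFst, if_neg hne, Prod.mk.injEq, true_and]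
        omega
      · rw [if_neg hm2,
          if_pos (show (t.map (fun f => pvM 0 f)).foldl max (pvM 0 f) > b by omega)]
        have heq : pvM 0 f = (t.map (fun f => pvM 0 f)).foldl max (pvM 0 f) := by omega
        simp only [pvIdxFst, if_pos heq, Prod.mk.injEq, true_and]
        simp
    · rw [if_neg hgt, ih (s + 1) b fi hb, max_eq_left (by omega)]
      by_cases hmb : (t.map (fun f => pvM 0 f)).foldl max b > b
      · rw [if_pos hmb]
        have hne : pvM 0 f ≠ (t.map (fun f => pvM 0 f)).foldl max b := by omega
        simp only [pvIdxFst, if_neg hne, Prod.mk.injEq, true_and]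
        omega
      · rw [if_neg hmb, if_neg hmb]

-- ===== VERDICT (by name: the statement is the Claim_ definition above) =====
theorem butacas_contiguas_spec : Claim_equal_butacas_contiguas := by
  intro matriz _
  unfold Spec_butacas_contiguas
  unfold butacas_contiguas
  rw [outerA matriz 0 0 (-1) le_rfl, selEq matriz 0 0 (-1) le_rfl]
  unfold butacas_contiguas_alt
  have hruns : matriz.map pvCorrida = matriz.map (fun f => pvM 0 f) :=
    List.map_congr_left (fun f _ => pvCorrida_eq f)
  simp only [hruns]
  cases hcase : matriz.map (fun f => pvM 0 f) with
  | nil => simp [PySem.List.max?]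
  | cons r t =>
    have hr0 : 0 ≤ r := by
      have hmem : r ∈ matriz.map (fun f => pvM 0 f) := by
        rw [hcase]; exact List.mem_cons_self
      rcases List.mem_map.mp hmem with ⟨f, _, hf⟩
      rw [← hf]; exact pvM_ge f 0
    simp only [PySem.List.max?_id_cons]
    have hfold : List.foldl max 0 (r :: t) = List.foldl max r t := by
      simp only [List.foldl_cons]; rw [max_eq_right hr0]
    rw [hfold]
    by_cases hm : List.foldl max r t > 0
    · rw [if_pos hm]
      have hmem : List.foldl max r t ∈ r :: t := by
        rcases foldl_max_mem t r with h | h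
        · rw [h]; exact List.mem_cons_self
        · exact List.mem_cons_of_mem _ h
      rw [index?_eq_pvIdxFst (r :: t) _ hmem]
      simp [hm]
    · rw [if_neg hm]
      simp [hm]
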